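-- pv_equiv track=rewrite | github.com/theVikingMan/LeetCode | problems/LeetCode_2135_CountWordsObtainedAfterAddingToList.py | solution
-- ===== SOURCE A (Python) =====
-- def solution(startWords, targetWords):
--   sWords = set()
--   res = 0
--
--   for w in startWords:
--     wSorted = "".join(sorted(w))
--     sWords.add(wSorted)
--
--   for w in targetWords:
--     wS = "".join(sorted(w))
--     for i in range(len(wS)):
--       prev = wS[:i] + wS[i+1:]
--       if prev in sWords and wS[i] not in prev:
--         res += 1
--         break
--
--   return res
-- ===== SOURCE B (Python) =====
-- def solution(startWords, targetWords):
--     # Inverted index: group each target's candidate predecessors (its sorted form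
--     # with one unique letter removed) by that predecessor string, then scan the
--     # distinct sorted start words once, mark the targets they reach, and count
--     # the marked targets.
--     parents = {}
--     for ti, w in enumerate(targetWords):
--         ws = "".join(sorted(w))
--         for i in range(len(ws)):
--             p = ws[:i] + ws[i+1:]
--             if ws[i] not in p:
--                 parents.setdefault(p, []).append(ti)
--     matched = [False] * len(targetWords)
--     for k in dict.fromkeys("".join(sorted(w)) for w in startWords):
--         for ti in parents.get(k, []):
--             matched[ti] = True
--     return sum(matched)
-- ===== Notes on version B (the rewrite author's own statement) =====
-- stated objective: alternative
-- what changed: A scans each target word and probes a hash set of sorted start words; B inverts the data flow: it builds an index mapping each target's candidate predecessor strings (sorted target with one unique letter removed) to the target indices, then makes one marking pass over the distinct sorted start words and counts the marked targets, so the counting loop runs over start keys, not targets.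
import Mathlib
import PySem

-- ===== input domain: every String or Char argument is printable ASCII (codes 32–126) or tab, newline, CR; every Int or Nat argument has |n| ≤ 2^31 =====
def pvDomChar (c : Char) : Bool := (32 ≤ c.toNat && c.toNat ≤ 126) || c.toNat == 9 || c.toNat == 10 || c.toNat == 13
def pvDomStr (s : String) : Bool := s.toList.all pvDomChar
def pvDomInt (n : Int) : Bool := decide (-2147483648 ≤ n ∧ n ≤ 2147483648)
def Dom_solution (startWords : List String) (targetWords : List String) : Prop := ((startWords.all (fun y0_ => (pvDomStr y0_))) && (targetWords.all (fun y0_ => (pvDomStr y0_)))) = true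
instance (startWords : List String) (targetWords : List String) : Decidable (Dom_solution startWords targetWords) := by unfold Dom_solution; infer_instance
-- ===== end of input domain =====

-- B inverts A's data flow: instead of probing a set of sorted start words once per index of each
-- target, B builds an index from each target's candidate predecessors to the target's position,
-- marks targets in one pass over the start words, and counts the marked targets.

-- ===== PORT A =====
-- A's inner 'for i in range(len(wS)): … break' loop, over the remaining indices
def aCheck (sW : PySem.Set String) (wS : List Char) : List Int → Bool
  | [] => false
  | i :: rest =>
    -- prev = wS[:i] + wS[i+1:]
    let prev := PySem.List.slice wS none (some i) ++ PySem.List.slice wS (some (i + 1)) none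
    -- wS[i]: i comes from range(len(wS)), so the index is in range (pyGetD is the total form)
    if PySem.Set.contains sW (String.ofList prev) && !(prev.contains (PySem.List.pyGetD wS i default)) then
      true
    else
      aCheck sW wS rest

def solution (startWords : List String) (targetWords : List String) : Int :=
  let sWords := startWords.foldl
    (fun s w => PySem.Set.add s (String.ofList (PySem.List.sorted w.toList (fun c => c) false)))
    PySem.Set.empty
  targetWords.foldl
    (fun res w =>
      let wS := PySem.List.sorted w.toList (fun c => c) false
      if aCheck sWords wS (PySem.List.pyRange 0 (wS.length : Int) 1) then res + 1 else res)
    0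

-- ===== PORT B =====
def solution_alt (startWords : List String) (targetWords : List String) : Int :=
  -- parents: candidate predecessor string ↦ indices of the targets it can be extended to
  let parents : PySem.Dict String (List Int) :=
    (PySem.List.enumerate targetWords 0).foldl
      (fun d tw =>
        let ws := PySem.List.sorted tw.2.toList (fun c => c) false
        (PySem.List.pyRange 0 (ws.length : Int) 1).foldl
          (fun d i =>
            let p := PySem.List.slice ws none (some i) ++ PySem.List.slice ws (some (i + 1)) none
            if !(p.contains (PySem.List.pyGetD ws i default)) then
              -- parents.setdefault(p, []).append(ti)
              d.modify (String.ofList p) [] (· ++ [tw.1])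
            else d)
          d)
      PySem.Dict.empty
  -- matched = [False] * n; for k in dict.fromkeys(sorted start words): mark parents.get(k, [])
  let matched : List Bool :=
    (PySem.List.dedup
        (startWords.map (fun w => String.ofList (PySem.List.sorted w.toList (fun c => c) false)))).foldl
      (fun m k =>
        (parents.getD k []).foldl (fun m ti => PySem.List.pySetD m ti true) m)
      (List.replicate targetWords.length false)
  -- sum(matched)
  matched.foldl (fun acc b => acc + (if b then (1 : Int) else 0)) 0

-- ===== PRECONDITION & SPEC =====
def Spec_solution (startWords : List String) (targetWords : List String) (out : Int) : Prop := out = solution_alt startWords targetWords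
instance (startWords : List String) (targetWords : List String) (out : Int) : Decidable (Spec_solution startWords targetWords out) := by unfold Spec_solution; infer_instance

-- ===== CLAIM (what is proved, stated in full; the proofs are below) =====
def Claim_equal_solution : Prop := ∀ (startWords : List String) (targetWords : List String), Dom_solution startWords targetWords → Spec_solution startWords targetWords (solution startWords targetWords)

-- ===== LEMMAS AND PROOFS =====

-- the sorted-character key of a word, and its candidate predecessors
def sKey (w : String) : List Char := PySem.List.sorted w.toList (fun c => c) false

def prevAt (l : List Char) (i : Int) : List Char :=
  PySem.List.slice l none (some i) ++ PySem.List.slice l (some (i + 1)) none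

def candIdx (l : List Char) : List Int :=
  (PySem.List.pyRange 0 (l.length : Int) 1).filter
    (fun i => !((prevAt l i).contains (PySem.List.pyGetD l i default)))

def cands (l : List Char) : List String := (candIdx l).map (fun i => String.ofList (prevAt l i))

-- A's success condition at index k of the sorted word l
def Acond (sW : PySem.Set String) (l : List Char) (k : Nat) : Prop :=
  PySem.Set.contains sW (String.ofList (l.take k ++ l.drop (k + 1))) = true ∧
    (l.take k ++ l.drop (k + 1)).contains (l.getD k default) = false

theorem aCheck_iff (sW : PySem.Set String) (l : List Char) :
    ∀ (d i : Nat), l.length - i = d →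
    (aCheck sW l (PySem.List.pyRange (i : Int) (l.length : Int) 1) = true ↔
      ∃ k, i ≤ k ∧ k < l.length ∧ Acond sW l k) := by
  intro d
  induction d with
  | zero =>
    intro i hi
    rw [PySem.List.pyRange_one_eq_nil (by exact_mod_cast Nat.le_of_sub_eq_zero hi)]
    simp [aCheck]
    omega
  | succ d ih =>
    intro i hi
    have hin : i < l.length := by omega
    rw [PySem.List.pyRange_one_cons (by exact_mod_cast hin)]
    have hcast : ((i : Int) + 1) = ((i + 1 : Nat) : Int) := by push_cast; ring
    simp only [aCheck, hcast, PySem.List.slice_to_natCast, PySem.List.slice_from_natCast,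
      PySem.List.pyGetD_natCast]
    by_cases hc : (PySem.Set.contains sW (String.ofList (l.take i ++ l.drop (i + 1))) &&
        !((l.take i ++ l.drop (i + 1)).contains (l.getD i default))) = true
    · rw [if_pos hc]
      simp only [Bool.and_eq_true, Bool.not_eq_true'] at hc
      constructor
      · intro _; exact ⟨i, le_refl i, hin, hc.1, hc.2⟩
      · intro _; rfl
    · rw [if_neg hc]
      rw [ih (i + 1) (by omega)]
      constructor
      · rintro ⟨k, hk1, hk2, hk3⟩; exact ⟨k, by omega, hk2, hk3⟩
      · rintro ⟨k, hk1, hk2, hk3⟩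
        refine ⟨k, ?_, hk2, hk3⟩
        rcases Nat.lt_or_ge i k with h | h
        · omega
        · exfalso
          have hik : k = i := by omega
          subst hik
          apply hc
          simp only [Bool.and_eq_true, Bool.not_eq_true']
          exact ⟨hk3.1, hk3.2⟩

theorem sets_eq (startWords : List String) :
    PySem.Set.ofList (startWords.map (fun w => String.ofList (sKey w))) =
      startWords.foldl
        (fun s w => PySem.Set.add s (String.ofList (PySem.List.sorted w.toList (fun c => c) false)))
        PySem.Set.empty := by
  rw [PySem.Set.ofList_eq_foldl, List.foldl_map]
  rfl

-- the flat (candidate, target index) pair list B's dict groups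
def flatPairs (targetWords : List String) : List (String × Int) :=
  (PySem.List.enumerate targetWords 0).flatMap
    (fun tw => (cands (sKey tw.2)).map (fun p => (p, tw.1)))

theorem dict_eq (targetWords : List String) :
    ((PySem.List.enumerate targetWords 0).foldl
      (fun d tw =>
        let ws := PySem.List.sorted tw.2.toList (fun c => c) false
        (PySem.List.pyRange 0 (ws.length : Int) 1).foldl
          (fun d i =>
            let p := PySem.List.slice ws none (some i) ++ PySem.List.slice ws (some (i + 1)) none
            if !(p.contains (PySem.List.pyGetD ws i default)) then
              d.modify (String.ofList p) [] (· ++ [tw.1])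
            else d)
          d)
      (PySem.Dict.empty : PySem.Dict String (List Int))) =
    (flatPairs targetWords).foldl (fun d p => d.modify p.1 [] (· ++ [p.2])) PySem.Dict.empty := by
  unfold flatPairs
  rw [List.foldl_flatMap]
  congr 1
  funext d tw
  unfold cands candIdx
  rw [List.map_map, List.foldl_map, List.foldl_filter]
  rfl

theorem mem_getD_iff (targetWords : List String) (k : String) (x : Int) :
    x ∈ ((flatPairs targetWords).foldl (fun d p => d.modify p.1 [] (· ++ [p.2]))
          (PySem.Dict.empty : PySem.Dict String (List Int))).getD k [] ↔
      ∃ (j : Nat) (h : j < targetWords.length),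
        x = (j : Int) ∧ k ∈ cands (sKey targetWords[j]) := by
  rw [PySem.Dict.getD_foldl_modify_append, PySem.Dict.getD_empty, List.nil_append]
  constructor
  · intro hx
    obtain ⟨⟨p, ti⟩, hpf, rfl⟩ := List.mem_map.mp hx
    obtain ⟨hpmem, hk⟩ := List.mem_filter.mp hpf
    unfold flatPairs at hpmem
    obtain ⟨tw, htw, hmap⟩ := List.mem_flatMap.mp hpmem
    obtain ⟨j, hj, rfl⟩ := (PySem.List.mem_enumerate_iff _ _ _).mp htw
    obtain ⟨q, hq, hpair⟩ := List.mem_map.mp hmap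
    simp only [beq_iff_eq] at hk
    obtain ⟨rfl, rfl⟩ : q = p ∧ (0 + (j : Int)) = ti := by
      simpa using And.intro (congrArg Prod.fst hpair) (congrArg Prod.snd hpair)
    subst hk
    exact ⟨j, hj, by simp, by simpa using hq⟩
  · rintro ⟨j, hj, rfl, hc⟩
    apply List.mem_map.mpr
    refine ⟨(k, (j : Int)), List.mem_filter.mpr ⟨?_, by simp⟩, rfl⟩
    unfold flatPairs
    apply List.mem_flatMap.mpr
    refine ⟨(0 + (j : Int), targetWords[j]), (PySem.List.mem_enumerate_iff _ _ _).mpr ⟨j, hj, rfl⟩, ?_⟩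
    apply List.mem_map.mpr
    exact ⟨k, by simpa using hc, by simp⟩

-- marking pass: one index list
theorem mark_length (ixs : List Int) :
    ∀ m : List Bool, (ixs.foldl (fun m ti => PySem.List.pySetD m ti true) m).length = m.length := by
  induction ixs with
  | nil => intro m; rfl
  | cons x ixs ih => intro m; rw [List.foldl_cons, ih, PySem.List.length_pySetD]

theorem mark_getD (ixs : List Int) :
    ∀ (m : List Bool) (j : Nat), j < m.length → (∀ x ∈ ixs, ∃ u : Nat, x = (u : Int)) →
      (ixs.foldl (fun m ti => PySem.List.pySetD m ti true) m).getD j false =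
        (m.getD j false || ixs.contains ((j : Int))) := by
  induction ixs with
  | nil => intro m j _ _; simp
  | cons x ixs ih =>
    intro m j hj hix
    obtain ⟨u, hu⟩ := hix x (List.mem_cons_self)
    subst hu
    rw [List.foldl_cons]
    have hset : PySem.List.pySetD m ((u : Nat) : Int) true = m.set u true :=
      PySem.List.pySetD_natCast m u true
    rw [hset, ih _ j (by simpa using hj) (fun y hy => hix y (List.mem_cons_of_mem _ hy))]
    by_cases huj : u = j
    · subst huj
      simp [List.getD_eq_getElem?_getD, hj]
    · simp [List.getD_eq_getElem?_getD, huj, show ¬ j = u from fun h => huj h.symm]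

-- the whole marking phase over a list of keys
theorem matched_getD (parents : PySem.Dict String (List Int))
    (hvals : ∀ k x, x ∈ parents.getD k [] → ∃ u : Nat, x = (u : Int)) (ks : List String) :
    ∀ (m : List Bool) (j : Nat), j < m.length →
      (ks.foldl
        (fun m k => (parents.getD k []).foldl (fun m ti => PySem.List.pySetD m ti true) m)
        m).getD j false =
      (m.getD j false || ks.any (fun k => (parents.getD k []).contains ((j : Int)))) := by
  induction ks with
  | nil => intro m j _; simp
  | cons k ks ih =>
    intro m j hj
    rw [List.foldl_cons, ih _ j (by rw [mark_length]; exact hj),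
      mark_getD _ _ _ hj (fun x hx => hvals _ x hx)]
    simp [Bool.or_assoc]

theorem matched_length (parents : PySem.Dict String (List Int)) (ks : List String) :
    ∀ m : List Bool,
      (ks.foldl
        (fun m k => (parents.getD k []).foldl (fun m ti => PySem.List.pySetD m ti true) m)
        m).length = m.length := by
  induction ks with
  | nil => intro m; rfl
  | cons k ks ih => intro m; rw [List.foldl_cons, ih, mark_length]

-- A's per-word success ↔ some start word's key is a candidate predecessor
theorem perWord_iff (startWords : List String) (w : String) :
    (aCheck (PySem.Set.ofList (startWords.map (fun s => String.ofList (sKey s)))) (sKey w)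
        (PySem.List.pyRange 0 ((sKey w).length : Int) 1) = true) ↔
      ∃ s ∈ startWords, String.ofList (sKey s) ∈ cands (sKey w) := by
  have h0 : ((0 : Nat) : Int) = (0 : Int) := rfl
  rw [← h0, aCheck_iff _ (sKey w) (sKey w).length 0 (by omega)]
  constructor
  · rintro ⟨k, -, hk2, hc1, hc2⟩
    rw [PySem.Set.contains_iff, PySem.Set.mem_ofList, List.mem_map] at hc1
    obtain ⟨s, hs, hkey⟩ := hc1
    refine ⟨s, hs, ?_⟩
    unfold cands candIdx
    simp only [List.mem_map, List.mem_filter]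
    refine ⟨(k : Int), ⟨?_, ?_⟩, ?_⟩
    · rw [PySem.List.mem_pyRange_one]; constructor <;> [positivity; exact_mod_cast hk2]
    · simp only [prevAt, PySem.List.slice_to_natCast]
      have : ((k : Int) + 1) = ((k + 1 : Nat) : Int) := by push_cast; ring
      rw [this, PySem.List.slice_from_natCast, PySem.List.pyGetD_natCast]
      rw [List.getD_eq_getElem?_getD] at hc2
      simp only [List.contains_eq_mem, List.mem_append, decide_eq_false_iff_not, not_or] at hc2
      simpa using hc2
    · simp only [prevAt, PySem.List.slice_to_natCast]
      have : ((k : Int) + 1) = ((k + 1 : Nat) : Int) := by push_cast; ring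
      rw [this, PySem.List.slice_from_natCast]
      exact hkey.symm
  · rintro ⟨s, hs, hc⟩
    unfold cands candIdx at hc
    simp only [List.mem_map, List.mem_filter] at hc
    obtain ⟨i, ⟨hir, hcond⟩, hstr⟩ := hc
    rw [PySem.List.mem_pyRange_one] at hir
    obtain ⟨hi0, hilen⟩ := hir
    obtain ⟨k, rfl⟩ : ∃ k : Nat, i = (k : Int) := ⟨i.toNat, (Int.toNat_of_nonneg hi0).symm⟩
    have hk2 : k < (sKey w).length := by exact_mod_cast hilen
    have hcast : ((k : Int) + 1) = ((k + 1 : Nat) : Int) := by push_cast; ring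
    simp only [prevAt, PySem.List.slice_to_natCast, hcast, PySem.List.slice_from_natCast,
      PySem.List.pyGetD_natCast, Bool.not_eq_eq_eq_not, Bool.not_true] at hcond hstr
    refine ⟨k, Nat.zero_le k, hk2, ?_, hcond⟩
    rw [PySem.Set.contains_iff, PySem.Set.mem_ofList, List.mem_map]
    exact ⟨s, hs, hstr.symm⟩

-- ===== VERDICT (by name: the statement is the Claim_ definition above) =====
theorem solution_spec : Claim_equal_solution := by
  intro startWords targetWords _
  unfold Spec_solution solution solution_alt
  dsimp only
  rw [← sets_eq, dict_eq]
  set n := targetWords.length with hn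
  set parents := (flatPairs targetWords).foldl (fun d p => d.modify p.1 [] (· ++ [p.2]))
    (PySem.Dict.empty : PySem.Dict String (List Int)) with hparents
  have hvals : ∀ k x, x ∈ parents.getD k [] → ∃ u : Nat, x = (u : Int) := by
    intro k x hx
    rw [hparents, mem_getD_iff] at hx
    obtain ⟨j, _, hx, _⟩ := hx
    exact ⟨j, hx⟩
  set matched := (PySem.List.dedup
      (startWords.map (fun w => String.ofList (PySem.List.sorted w.toList (fun c => c) false)))).foldl
      (fun m k => (parents.getD k []).foldl (fun m ti => PySem.List.pySetD m ti true) m)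
      (List.replicate n false) with hmatched
  have hmlen : matched.length = n := by
    rw [hmatched, matched_length]; exact List.length_replicate
  have hpoint : ∀ j : Nat, (hj : j < n) →
      matched.getD j false =
        aCheck (PySem.Set.ofList (startWords.map (fun s => String.ofList (sKey s))))
          (sKey targetWords[j]) (PySem.List.pyRange 0 ((sKey targetWords[j]).length : Int) 1) := by
    intro j hj
    rw [hmatched, matched_getD parents hvals _ _ j (by simpa using hj)]
    simp only [List.getD_eq_getElem?_getD, List.getElem?_replicate]
    rw [if_pos hj]
    simp only [Option.getD_some, Bool.false_or]
    rw [Bool.eq_iff_iff, List.any_eq_true]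
    rw [perWord_iff]
    constructor
    · rintro ⟨key, hkey, hcont⟩
      rw [PySem.List.mem_dedup, List.mem_map] at hkey
      obtain ⟨s, hs, rfl⟩ := hkey
      rw [List.contains_iff_mem, hparents, mem_getD_iff] at hcont
      obtain ⟨j', hj', hje, hc⟩ := hcont
      have : j' = j := by exact_mod_cast hje.symm
      subst this
      exact ⟨s, hs, hc⟩
    · rintro ⟨s, hs, hc⟩
      refine ⟨String.ofList (sKey s), ?_, ?_⟩
      · rw [PySem.List.mem_dedup, List.mem_map]
        exact ⟨s, hs, rfl⟩
      · rw [List.contains_iff_mem, hparents, mem_getD_iff]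
        exact ⟨j, hj, rfl, hc⟩
  have hvec : matched = targetWords.map (fun w =>
      aCheck (PySem.Set.ofList (startWords.map (fun s => String.ofList (sKey s)))) (sKey w)
        (PySem.List.pyRange 0 ((sKey w).length : Int) 1)) := by
    apply List.ext_getElem
    · rw [hmlen, List.length_map]
    · intro j h1 h2
      have hj : j < n := by omega
      have := hpoint j hj
      rw [List.getD_eq_getElem _ _ h1] at this
      rw [this]
      simp
  rw [hvec, List.foldl_map]
  apply List.foldl_ext
  intro acc w _
  have hsplit : ∀ C : Bool, (if C = true then acc + 1 else acc) = acc + (if C = true then (1 : Int) else 0) := by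
    intro C; cases C <;> simp
  exact hsplit _
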